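-- pv_equiv track=rewrite | github.com/JabroAMQ/BotGius | Code/Utilities/to_chunks.py | to_chunks
-- ===== SOURCE A (Python) =====
-- def to_chunks(initial_list : list[str], limit : int = 2000) -> list[str]:
--     """
--     Given a raw list where each list's element is an object, this is, if Artist list then each element of the list is an artist,
--     join together the elements of the list to create "discord messages", this is, creates sublists the closest to len `limit` without
--     exceeding it.
--
--     Return:
--     ----------
--     A new list of strings, each of them being a sublist converted to string by joining the subelements with a 'new line' so that the new list can be
--     interpreted as the content of the messages to send to Discord with the optimal lenght.
--     """
--     def get_optimal_msg_size(lst : list[str], limit : int) -> tuple[list[str], list[str]]: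
--         """Auxiliar function to extract the next "message" (element of the final list) given the not yet processed part of the `initial_list`"""
--         for i in range(len(lst)):
--             if len(' '.join(lst[:i+1])) > limit:
--                 return lst[:i], lst[i:]
--         return lst, None
--
--     answer = []
--     left = initial_list
--     while True:
--         optimal, left = get_optimal_msg_size(left, limit)
--         answer += ['\n'.join(optimal)]
--         if not left:
--             break
--     return answer
-- ===== SOURCE B (Python) =====
-- def to_chunks(initial_list : list[str], limit : int = 2000) -> list[str]:
--     # Prefix-key table + binary search per chunk: keys[k] = sum(len(x) for x in initial_list[:k]) + k,
--     # so len('\n'.join(initial_list[a:b])) = keys[b] - keys[a] - 1; each chunk end is found by binary search.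
--     if not initial_list:
--         return ['']
--     keys = [0]
--     total = 0
--     for s in initial_list:
--         total += len(s) + 1
--         keys.append(total)
--     n = len(initial_list)
--     answer = []
--     a = 0
--     while a < n:
--         target = limit + keys[a] + 1
--         lo, hi = a + 1, n          # largest b in [a+1, n] with keys[b] <= target (a+1 if none)
--         while lo < hi:
--             mid = (lo + hi + 1) // 2
--             if keys[mid] <= target:
--                 lo = mid
--             else:
--                 hi = mid - 1
--         b = lo
--         answer.append('\n'.join(initial_list[a:b]))
--         a = b
--     return answer
-- ===== Notes on version B (the rewrite author's own statement) =====
-- stated objective: faster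
-- what changed: A re-joins and re-measures the whole prefix of the remaining list for every candidate split point; B precomputes a prefix-sum key table (keys[k] = sum of lengths of the first k elements + k) once and finds each chunk end with a binary search over it.
import Mathlib
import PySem

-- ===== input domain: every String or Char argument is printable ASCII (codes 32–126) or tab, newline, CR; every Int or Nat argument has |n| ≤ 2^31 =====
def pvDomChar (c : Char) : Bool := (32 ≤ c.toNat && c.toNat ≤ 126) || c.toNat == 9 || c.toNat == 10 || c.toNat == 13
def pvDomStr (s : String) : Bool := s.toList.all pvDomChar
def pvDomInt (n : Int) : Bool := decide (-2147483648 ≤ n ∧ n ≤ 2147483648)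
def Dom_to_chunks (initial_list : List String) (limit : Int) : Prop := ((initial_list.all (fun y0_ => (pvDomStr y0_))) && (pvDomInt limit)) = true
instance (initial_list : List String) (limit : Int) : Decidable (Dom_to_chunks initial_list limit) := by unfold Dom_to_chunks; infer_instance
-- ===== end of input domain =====

-- B replaces A's repeated full re-joins per candidate split with a prefix-sum key table and one
-- binary search per chunk (objective: faster). Equivalence is on the return value, on inputs where
-- A terminates (Pre_: every element fits in the limit; otherwise A loops forever).

-- ===== PORT A =====
-- inner helper get_optimal_msg_size: scan i = 0,1,…; lst[:i+1] / lst[:i] / lst[i:] are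
-- nonnegative slices, ported as take/drop (exact by PySem.List.slice_to / slice_from).
-- 'for i in range(len(lst))' runs exactly lst.length iterations: rem counts the remaining ones
def getOptimal (lst : List String) (limit : Int) (i rem : Nat) : List String × Option (List String) :=
  match rem with
  | 0 => (lst, none)
  | rem + 1 =>
    if PySem.Str.len (PySem.Str.join " " (lst.take (i+1))) > limit then
      (lst.take i, some (lst.drop i))
    else getOptimal lst limit (i+1) rem

-- the 'while True' loop; fuel initial_list.length + 1 is enough for every terminating run
-- (each iteration consumes at least one element); fuel 0 is unreachable under Pre_.
def aLoop (limit : Int) (fuel : Nat) (answer left : List String) : List String :=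
  match fuel with
  | 0 => answer
  | fuel + 1 =>
    match getOptimal left limit 0 left.length with
    | (optimal, left?) =>
      let answer' := answer ++ [PySem.Str.join "\n" optimal]
      match left? with
      | none => answer'                 -- left is None: 'if not left: break'
      | some l => if l = [] then answer' else aLoop limit fuel answer' l

def to_chunks (initial_list : List String) (limit : Int) : List String :=
  aLoop limit (initial_list.length + 1) [] initial_list

-- ===== PORT B =====
-- keys list built by the 'for s in initial_list' loop carrying (keys, total)
def mkKeys (initial_list : List String) : List Int × Int :=
  initial_list.foldl (fun st s =>
    let total := st.2 + PySem.Str.len s + 1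
    (st.1 ++ [total], total)) ([0], 0)

-- the inner 'while lo < hi' binary search; fuel only makes the loop structurally total
-- (hi - lo shrinks every iteration, so any fuel ≥ hi - lo gives the Python's value)
def bsearch (keys : List Int) (target : Int) (fuel lo hi : Nat) : Nat :=
  match fuel with
  | 0 => lo
  | fuel + 1 =>
    if lo < hi then
      let mid := (lo + hi + 1) / 2
      if keys.getD mid 0 ≤ target then bsearch keys target fuel mid hi
      else bsearch keys target fuel lo (mid - 1)
    else lo

-- the outer 'while a < n' loop; fuel ≥ n - a makes it structurally total
-- (each chunk advances a by at least one)
def altLoop (keys : List Int) (xs : List String) (limit : Int) (n : Nat) (fuel a : Nat)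
    (answer : List String) : List String :=
  match fuel with
  | 0 => answer
  | fuel + 1 =>
    if a < n then
      let target := limit + keys.getD a 0 + 1
      let b := bsearch keys target n (a + 1) n
      altLoop keys xs limit n fuel b
        (answer ++ [PySem.Str.join "\n" ((xs.drop a).take (b - a))])
    else answer

def to_chunks_alt (initial_list : List String) (limit : Int) : List String :=
  if initial_list = [] then [""]
  else altLoop (mkKeys initial_list).1 initial_list limit initial_list.length initial_list.length 0 []

-- ===== PRECONDITION & SPEC =====
-- A terminates exactly when every element's length is ≤ limit; on any other input the Python A
-- loops forever (returns nothing), so those inputs are outside Pre_.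
def Pre_to_chunks (initial_list : List String) (limit : Int) : Prop :=
  ∀ s ∈ initial_list, PySem.Str.len s ≤ limit
instance (initial_list : List String) (limit : Int) : Decidable (Pre_to_chunks initial_list limit) := by
  unfold Pre_to_chunks; infer_instance

def pvWitness_to_chunks : List String × Int := (["abc", "de", "f", "ghij"], 7)

def Spec_to_chunks (initial_list : List String) (limit : Int) (out : List String) : Prop := out = to_chunks_alt initial_list limit
instance (initial_list : List String) (limit : Int) (out : List String) : Decidable (Spec_to_chunks initial_list limit out) := by unfold Spec_to_chunks; infer_instance

-- ===== CLAIM (what is proved, stated in full; the proofs are below) =====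
def Claim_equal_to_chunks : Prop := ∀ (initial_list : List String) (limit : Int), Dom_to_chunks initial_list limit → Pre_to_chunks initial_list limit → Spec_to_chunks initial_list limit (to_chunks initial_list limit)

-- ===== LEMMAS AND PROOFS =====

-- prefix length sums: S xs k = sum of lengths of xs[:k]; K xs k = S xs k + k, so that
-- len('\n'.join(xs[a:b])) = K xs b - K xs a - 1 and (mkKeys xs).1[k] = K xs k.
def pvS (xs : List String) (k : Nat) : Int := ((xs.take k).map PySem.Str.len).sum
def pvK (xs : List String) (k : Nat) : Int := pvS xs k + k

theorem mkKeys_eq (xs : List String) :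
    mkKeys xs = ((List.range (xs.length + 1)).map (fun k => pvK xs k), pvK xs xs.length) := by
  induction xs using List.reverseRecOn with
  | nil => simp [mkKeys, pvK, pvS]
  | append_singleton xs s ih =>
    unfold mkKeys at ih ⊢
    rw [List.foldl_append, ih]
    have hlast : pvK (xs ++ [s]) (xs.length + 1) = pvK xs xs.length + PySem.Str.len s + 1 := by
      simp [pvK, pvS, List.take_of_length_le]
      ring
    simp only [List.foldl_cons, List.foldl_nil]
    refine Prod.ext ?_ ?_
    · simp only [List.length_append, List.length_singleton, List.range_succ (n := xs.length + 1),
        List.map_append, List.map_cons, List.map_nil]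
      refine congrArg₂ (· ++ ·) ?_ ?_
      · apply List.map_congr_left
        intro k hk
        have hk' : k ≤ xs.length := by
          have := List.mem_range.mp hk; omega
        simp [pvK, pvS, List.take_append_of_le_length hk']
      · simp [hlast]
    · simp [hlast]

theorem keys_getD (xs : List String) (k : Nat) (hk : k ≤ xs.length) :
    (mkKeys xs).1.getD k 0 = pvK xs k := by
  rw [mkKeys_eq]
  rw [List.getD_eq_getElem?_getD, List.getElem?_map, List.getElem?_range (by omega : k < xs.length + 1)]
  rfl

theorem pvS_mono (xs : List String) {j k : Nat} (h : j ≤ k) : pvS xs j ≤ pvS xs k := by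
  unfold pvS
  have hsplit : xs.take k = (xs.take k).take j ++ (xs.take k).drop j := (List.take_append_drop j (xs.take k)).symm
  rw [hsplit, List.map_append, List.sum_append, List.take_take, min_eq_left h]
  have : 0 ≤ (((xs.take k).drop j).map PySem.Str.len).sum := by
    apply List.sum_nonneg
    intro x hx
    obtain ⟨s, _, rfl⟩ := List.mem_map.mp hx
    simp [PySem.Str.len_eq]
  omega

theorem pvK_mono (xs : List String) {j k : Nat} (h : j ≤ k) : pvK xs j ≤ pvK xs k := by
  have := pvS_mono xs h
  unfold pvK
  omega

-- length of sep.join(l) for a one-character separator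
theorem join_len (sep : String) (hsep : sep.toList.length = 1) (l : List String) (hl : l ≠ []) :
    PySem.Str.len (PySem.Str.join sep l) = (l.map PySem.Str.len).sum + l.length - 1 := by
  induction l with
  | nil => exact absurd rfl hl
  | cons x rest ih =>
    match rest with
    | [] =>
      simp [PySem.Str.len_eq, PySem.Str.toList_join, PySem.Chars.join_singleton]
    | y :: rest' =>
      have hlen : PySem.Str.len (PySem.Str.join sep (y :: rest')) =
          ((y :: rest').map PySem.Str.len).sum + (y :: rest').length - 1 := ih (by simp)
      simp only [PySem.Str.len_eq, PySem.Str.toList_join, List.map_cons,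
        PySem.Chars.join_cons_cons, List.length_append, List.sum_cons, List.length_cons] at hlen ⊢
      rw [hsep] at *
      push_cast at hlen ⊢
      omega

-- join length of the slice xs[a:a+m] in terms of pvK
theorem join_len_slice (sep : String) (hsep : sep.toList.length = 1) (xs : List String)
    (a m : Nat) (hm : 1 ≤ m) (hn : a + m ≤ xs.length) :
    PySem.Str.len (PySem.Str.join sep ((xs.drop a).take m)) =
      pvK xs (a + m) - pvK xs a - 1 := by
  have hne : (xs.drop a).take m ≠ [] := by
    have : ((xs.drop a).take m).length = m := by
      rw [List.length_take, List.length_drop]; omega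
    intro hcon; rw [hcon] at this; simp at this; omega
  rw [join_len sep hsep _ hne]
  have hlen : ((xs.drop a).take m).length = m := by
    rw [List.length_take, List.length_drop]; omega
  have hdt : (xs.drop a).take m = (xs.take (a + m)).drop a := by
    rw [List.drop_take]; congr 1; omega
  have hsplit : pvS xs (a + m) =
      (((xs.take (a + m)).take a).map PySem.Str.len).sum
        + (((xs.take (a + m)).drop a).map PySem.Str.len).sum := by
    unfold pvS
    conv_lhs => rw [(List.take_append_drop a (xs.take (a + m))).symm]
    rw [List.map_append, List.sum_append]
  rw [List.take_take, min_eq_left (by omega : a ≤ a + m)] at hsplit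
  have hsum : (((xs.drop a).take m).map PySem.Str.len).sum = pvS xs (a + m) - pvS xs a := by
    rw [hdt]
    unfold pvS at hsplit ⊢
    omega
  rw [hsum, hlen]
  unfold pvK
  push_cast
  ring

-- binary-search correctness against an abstract answer r, for any sufficient fuel
theorem bsearch_eq (keys : List Int) (t : Int) (r : Nat) :
    ∀ (fuel lo hi : Nat), hi - lo ≤ fuel → lo ≤ r → r ≤ hi →
      (∀ j, lo ≤ j → j ≤ r → keys.getD j 0 ≤ t) →
      (∀ j, r < j → j ≤ hi → t < keys.getD j 0) →
      bsearch keys t fuel lo hi = r := by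
  intro fuel
  induction fuel with
  | zero =>
    intro lo hi hd h1 h2 hdown hup
    show lo = r
    omega
  | succ d ih =>
    intro lo hi hd h1 h2 hdown hup
    show (if lo < hi then
            if keys.getD ((lo + hi + 1) / 2) 0 ≤ t then bsearch keys t d ((lo + hi + 1) / 2) hi
            else bsearch keys t d lo ((lo + hi + 1) / 2 - 1)
          else lo) = r
    by_cases hlt : lo < hi
    · rw [if_pos hlt]
      have hmid1 : lo < (lo + hi + 1) / 2 := by omega
      have hmid2 : (lo + hi + 1) / 2 ≤ hi := by omega
      by_cases hc : keys.getD ((lo + hi + 1) / 2) 0 ≤ t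
      · rw [if_pos hc]
        have hmr : (lo + hi + 1) / 2 ≤ r := by
          by_contra hcon
          exact absurd hc (not_le.mpr (hup _ (by omega) (by omega)))
        exact ih _ _ (by omega) hmr h2 (fun j hj1 hj2 => hdown j (by omega) hj2) hup
      · rw [if_neg hc]
        have hrm : r < (lo + hi + 1) / 2 := by
          by_contra hcon
          exact hc (hdown _ (by omega) (by omega))
        exact ih _ _ (by omega) (by omega) (by omega) hdown
          (fun j hj1 hj2 => hup j hj1 (by omega))
    · rw [if_neg hlt]
      omega

-- A's scan, found case: k is the first index whose cumulative join exceeds limit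
theorem getOptimal_found (lst : List String) (limit : Int) (k : Nat) (hk : k < lst.length)
    (hgt : limit < PySem.Str.len (PySem.Str.join " " (lst.take (k + 1))))
    (hle : ∀ j, j < k → PySem.Str.len (PySem.Str.join " " (lst.take (j + 1))) ≤ limit) :
    ∀ (rem i : Nat), i + rem = lst.length → i ≤ k →
      getOptimal lst limit i rem = (lst.take k, some (lst.drop k)) := by
  intro rem
  induction rem with
  | zero => intro i hinv hik; omega
  | succ rem ih =>
    intro i hinv hik
    show (if PySem.Str.len (PySem.Str.join " " (lst.take (i + 1))) > limit then
            (lst.take i, some (lst.drop i))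
          else getOptimal lst limit (i + 1) rem) = _
    by_cases hcond : PySem.Str.len (PySem.Str.join " " (lst.take (i + 1))) > limit
    · rw [if_pos hcond]
      have hik' : i = k := by
        rcases Nat.lt_or_ge i k with h | h
        · exact absurd hcond (not_lt.mpr (hle i h))
        · omega
      subst hik'
      rfl
    · rw [if_neg hcond]
      have hik' : i ≠ k := by
        intro h; subst h; exact hcond hgt
      exact ih (i + 1) (by omega) (by omega)

-- A's scan, no-overflow case
theorem getOptimal_none (lst : List String) (limit : Int)
    (h : ∀ j, j < lst.length → PySem.Str.len (PySem.Str.join " " (lst.take (j + 1))) ≤ limit) :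
    ∀ (rem i : Nat), i + rem = lst.length → getOptimal lst limit i rem = (lst, none) := by
  intro rem
  induction rem with
  | zero => intro i hinv; rfl
  | succ rem ih =>
    intro i hinv
    show (if PySem.Str.len (PySem.Str.join " " (lst.take (i + 1))) > limit then
            (lst.take i, some (lst.drop i))
          else getOptimal lst limit (i + 1) rem) = _
    rw [if_neg (not_lt.mpr (h i (by omega)))]
    exact ih (i + 1) (by omega)

-- one chunk step: A's scan from position a lands exactly where B's binary search lands
theorem step_eq (xs : List String) (limit : Int) (hpre : Pre_to_chunks xs limit)
    (a : Nat) (ha : a < xs.length) :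
    a + 1 ≤ bsearch (mkKeys xs).1 (limit + (mkKeys xs).1.getD a 0 + 1) xs.length (a + 1) xs.length ∧
    bsearch (mkKeys xs).1 (limit + (mkKeys xs).1.getD a 0 + 1) xs.length (a + 1) xs.length ≤ xs.length ∧
    getOptimal (xs.drop a) limit 0 (xs.drop a).length =
      ((xs.drop a).take (bsearch (mkKeys xs).1 (limit + (mkKeys xs).1.getD a 0 + 1) xs.length (a + 1) xs.length - a),
       if bsearch (mkKeys xs).1 (limit + (mkKeys xs).1.getD a 0 + 1) xs.length (a + 1) xs.length = xs.length then none
       else some ((xs.drop a).drop (bsearch (mkKeys xs).1 (limit + (mkKeys xs).1.getD a 0 + 1) xs.length (a + 1) xs.length - a))) := by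
  have hsp : (" " : String).toList.length = 1 := by decide
  set n := xs.length with hn
  set keys := (mkKeys xs).1 with hkeys
  set t := limit + keys.getD a 0 + 1 with ht
  have hKa : keys.getD a 0 = pvK xs a := keys_getD xs a (by omega)
  -- every element fits, so position a+1 is admissible
  have hPa1 : pvK xs (a + 1) ≤ t := by
    have htake : xs.take (a + 1) = xs.take a ++ [xs[a]] := by
      rw [List.take_add_one]
      simp [List.getElem?_eq_getElem ha]
    have hS : pvS xs (a + 1) = pvS xs a + PySem.Str.len xs[a] := by
      unfold pvS
      rw [htake, List.map_append, List.sum_append]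
      simp
    have hfit : PySem.Str.len xs[a] ≤ limit := hpre _ (List.getElem_mem ha)
    rw [ht, hKa]
    unfold pvK at *
    push_cast
    omega
  set r := Nat.findGreatest (fun k => keys.getD k 0 ≤ t) n with hr
  have hP1 : keys.getD (a+1) 0 ≤ t := by
    rw [hkeys, keys_getD xs (a+1) (by omega)]; exact hPa1
  have hr1 : a + 1 ≤ r := Nat.le_findGreatest (by omega) hP1
  have hr2 : r ≤ n := Nat.findGreatest_le n
  have hrP : keys.getD r 0 ≤ t := Nat.findGreatest_spec (P := fun k => keys.getD k 0 ≤ t) (m := a + 1) (by omega) hP1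
  have hrG : ∀ j, r < j → j ≤ n → t < keys.getD j 0 := fun j hj1 hj2 =>
    lt_of_not_ge (Nat.findGreatest_is_greatest (P := fun k => keys.getD k 0 ≤ t) hj1 hj2)
  have hrKP : pvK xs r ≤ t := by rw [← keys_getD xs r hr2, ← hkeys]; exact hrP
  have hb : bsearch keys t n (a + 1) n = r := by
    apply bsearch_eq keys t r n (a + 1) n (by omega) hr1 hr2
    · intro j hj1 hj2
      rw [hkeys, keys_getD xs j (by omega)]
      exact le_trans (pvK_mono xs hj2) hrKP
    · exact hrG
  rw [hb]
  refine ⟨hr1, hr2, ?_⟩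
  have hlstlen : (xs.drop a).length = n - a := by rw [List.length_drop]
  by_cases hcase : r = n
  · rw [if_pos hcase]
    rw [getOptimal_none (xs.drop a) limit ?_ (xs.drop a).length 0 (by omega)]
    · have : (xs.drop a).take (r - a) = xs.drop a := by
        apply List.take_of_length_le
        omega
      rw [this]
    · intro j hj
      rw [hlstlen] at hj
      rw [join_len_slice " " hsp xs a (j + 1) (by omega) (by omega)]
      have := pvK_mono xs (show a + (j + 1) ≤ r by omega)
      rw [ht, hKa] at hrKP
      omega
  · rw [if_neg hcase]
    rw [getOptimal_found (xs.drop a) limit (r - a) (by omega) ?_ ?_ (xs.drop a).length 0 (by omega) (by omega)]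
    · rw [join_len_slice " " hsp xs a (r - a + 1) (by omega) (by omega)]
      have hgt : t < pvK xs (r + 1) := by
        rw [← keys_getD xs (r + 1) (by omega), ← hkeys]
        exact hrG (r + 1) (by omega) (by omega)
      have heq : a + (r - a + 1) = r + 1 := by omega
      rw [heq]
      rw [ht, hKa] at hgt
      omega
    · intro j hj
      rw [join_len_slice " " hsp xs a (j + 1) (by omega) (by omega)]
      have := pvK_mono xs (show a + (j + 1) ≤ r by omega)
      rw [ht, hKa] at hrKP
      omega

-- altLoop is done once a reaches n, whatever fuel remains
theorem altLoop_stop (keys : List Int) (xs : List String) (limit : Int) (n : Nat) :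
    ∀ (fuel : Nat) (answer : List String), altLoop keys xs limit n fuel n answer = answer := by
  intro fuel answer
  match fuel with
  | 0 => rfl
  | fuel + 1 =>
    show (if n < n then _ else answer) = answer
    rw [if_neg (lt_irrefl n)]

-- the two loops agree from any position a < n, for any sufficient fuels
theorem loop_eq (xs : List String) (limit : Int) (hpre : Pre_to_chunks xs limit) :
    ∀ (fuel1 fuel2 a : Nat) (answer : List String), a < xs.length →
      xs.length - a ≤ fuel1 → xs.length - a ≤ fuel2 →
      aLoop limit fuel1 answer (xs.drop a) =
        altLoop (mkKeys xs).1 xs limit xs.length fuel2 a answer := by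
  intro fuel1
  induction fuel1 with
  | zero => intro fuel2 a answer ha hf1 hf2; omega
  | succ fuel1 ih =>
    intro fuel2 a answer ha hf1 hf2
    obtain ⟨hb1, hb2, hopt⟩ := step_eq xs limit hpre a ha
    set b := bsearch (mkKeys xs).1 (limit + (mkKeys xs).1.getD a 0 + 1) xs.length (a + 1) xs.length with hbdef
    obtain ⟨fuel2', rfl⟩ : ∃ f, fuel2 = f + 1 := ⟨fuel2 - 1, by omega⟩
    show (match getOptimal (xs.drop a) limit 0 (xs.drop a).length with
          | (optimal, left?) =>
            match left? with
            | none => answer ++ [PySem.Str.join "\n" optimal]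
            | some l => if l = [] then answer ++ [PySem.Str.join "\n" optimal]
                        else aLoop limit fuel1 (answer ++ [PySem.Str.join "\n" optimal]) l) =
      (if a < xs.length then
        altLoop (mkKeys xs).1 xs limit xs.length fuel2' b
          (answer ++ [PySem.Str.join "\n" ((xs.drop a).take (b - a))])
       else answer)
    rw [hopt, if_pos ha]
    by_cases hbn : b = xs.length
    · rw [if_pos hbn]
      show answer ++ [PySem.Str.join "\n" ((xs.drop a).take (b - a))] = _
      rw [hbn, altLoop_stop]
    · rw [if_neg hbn]
      have hdd : (xs.drop a).drop (b - a) = xs.drop b := by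
        rw [List.drop_drop]; congr 1; omega
      have hne : xs.drop b ≠ [] := by
        intro hcon
        have := congrArg List.length hcon
        rw [List.length_drop] at this
        simp at this
        omega
      show (if (xs.drop a).drop (b - a) = [] then
              answer ++ [PySem.Str.join "\n" ((xs.drop a).take (b - a))]
            else aLoop limit fuel1 (answer ++ [PySem.Str.join "\n" ((xs.drop a).take (b - a))])
              ((xs.drop a).drop (b - a))) = _
      rw [hdd, if_neg hne]
      exact ih fuel2' b _ (by omega) (by omega) (by omega)

-- ===== VERDICT (by name: the statement is the Claim_ definition above) =====
theorem to_chunks_spec : Claim_equal_to_chunks := by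
  intro xs limit _hdom hpre
  unfold Spec_to_chunks to_chunks to_chunks_alt
  by_cases hxs : xs = []
  · subst hxs
    rw [if_pos rfl]
    show ([] : List String) ++ [PySem.Str.join "\n" []] = [""]
    simp [PySem.Str.join, PySem.Chars.join, List.intercalate]
  · rw [if_neg hxs]
    have hn : 0 < xs.length := List.length_pos_of_ne_nil hxs
    have := loop_eq xs limit hpre (xs.length + 1) xs.length 0 [] hn (by omega) (by omega)
    simpa using this
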